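-- pv_equiv track=rewrite | github.com/SamEyeBam/animate | Python/ShapesStuff/nodal_pattern.py | iterations
-- ===== SOURCE A (Python) =====
-- def iterations(n,s):
--     i = 1
--     while True:
--         x = s*i
--         if(x % n== 0) and (x>= n):
--             return i
--         else:
--             i += 1
-- ===== SOURCE B (Python) =====
-- def iterations(n, s):
--     a, b = abs(n), abs(s)
--     while b:
--         a, b = b, a % b
--     return abs(n) // a
-- ===== Notes on version B (the rewrite author's own statement) =====
-- stated objective: faster
-- what changed: Replaces the linear search for the first i with n | s*i and s*i >= n by the closed form abs(n) // gcd(n, s) computed with Euclid's algorithm.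
import Mathlib
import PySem

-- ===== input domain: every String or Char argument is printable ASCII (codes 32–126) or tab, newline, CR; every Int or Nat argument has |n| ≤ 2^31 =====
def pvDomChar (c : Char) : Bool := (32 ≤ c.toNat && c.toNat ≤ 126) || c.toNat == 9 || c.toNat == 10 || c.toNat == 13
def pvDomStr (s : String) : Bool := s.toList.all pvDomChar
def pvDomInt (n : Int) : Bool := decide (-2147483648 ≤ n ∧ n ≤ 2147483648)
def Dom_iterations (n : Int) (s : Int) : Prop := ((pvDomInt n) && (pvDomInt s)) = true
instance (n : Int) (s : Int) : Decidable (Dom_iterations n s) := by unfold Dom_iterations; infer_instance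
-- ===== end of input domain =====

-- B replaces A's linear search by the closed form abs(n) // gcd(n, s) (Euclid); equivalence is
-- proved on Pre_iterations, exactly the inputs where A terminates without raising.

-- ===== PORT A =====
-- A's 'while True' loop; the fuel argument only makes the recursion total — under
-- Pre_iterations the answer is reached before the fuel runs out (proved below).
def iterLoopA (n s : Int) : Nat → Int → Int
  | 0, i => i
  | f + 1, i =>
    if PySem.Int.mod (s * i) n = 0 ∧ s * i ≥ n then i
    else iterLoopA n s f (i + 1)

def iterations (n : Int) (s : Int) : Int := iterLoopA n s (n.natAbs + 1) 1

-- ===== PORT B =====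
-- Source B's hand-written Euclid loop: while b: a, b = b, a % b
def euclid (a b : Nat) : Nat :=
  if h : b = 0 then a else euclid b (a % b)
termination_by b
decreasing_by exact Nat.mod_lt a (Nat.pos_of_ne_zero h)

def iterations_alt (n : Int) (s : Int) : Int :=
  ((n.natAbs / euclid n.natAbs s.natAbs : Nat) : Int)

-- ===== PRECONDITION & SPEC =====
-- Pre_ excludes exactly the inputs where the Python A does not return: n = 0 (ZeroDivisionError)
-- and the inputs where the loop never finds s*i a multiple of n with s*i ≥ n (it diverges:
-- n > 0 with s ≤ 0, and n < 0 with s < 0 not dividing n).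
def Pre_iterations (n : Int) (s : Int) : Prop :=
  n ≠ 0 ∧ (0 < s ∨ (n < 0 ∧ s = 0) ∨ (n < 0 ∧ s < 0 ∧ s ∣ n))
instance (n : Int) (s : Int) : Decidable (Pre_iterations n s) := by
  unfold Pre_iterations; infer_instance

def pvWitness_iterations : Int × Int := (8, 6)

def Spec_iterations (n : Int) (s : Int) (out : Int) : Prop := out = iterations_alt n s
instance (n : Int) (s : Int) (out : Int) : Decidable (Spec_iterations n s out) := by
  unfold Spec_iterations; infer_instance

-- ===== CLAIM (what is proved, stated in full; the proofs are below) =====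
def Claim_equal_iterations : Prop :=
  ∀ (n : Int) (s : Int), Dom_iterations n s → Pre_iterations n s →
    Spec_iterations n s (iterations n s)

-- ===== LEMMAS AND PROOFS =====

-- the hand-written Euclid loop is Nat.gcd
theorem euclid_eq_gcd (a b : Nat) : euclid a b = Nat.gcd a b := by
  fun_induction euclid with
  | case1 a => simp
  | case2 a b h ih => rw [ih, Nat.gcd_comm b _, ← Nat.gcd_rec, Nat.gcd_comm]

-- the loop returns the first index (from i) satisfying the condition, given enough fuel
theorem iterLoopA_reach (n s : Int) (f : Nat) (i i0 : Int)
    (hle : i ≤ i0) (hf : i0 < i + f)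
    (hP : PySem.Int.mod (s * i0) n = 0 ∧ s * i0 ≥ n)
    (hmin : ∀ j, i ≤ j → j < i0 → ¬(PySem.Int.mod (s * j) n = 0 ∧ s * j ≥ n)) :
    iterLoopA n s f i = i0 := by
  induction f generalizing i with
  | zero => omega
  | succ f ih =>
    rw [iterLoopA]
    by_cases h : PySem.Int.mod (s * i) n = 0 ∧ s * i ≥ n
    · have hei : i = i0 := by
        rcases lt_or_eq_of_le hle with hlt | he
        · exact absurd h (hmin i le_rfl hlt)
        · exact he
      subst hei
      rw [if_pos h]
    · rw [if_neg h]
      have hne : i ≠ i0 := fun he => h (he ▸ hP)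
      exact ih (i + 1) (by omega) (by omega)
        (fun j hj1 hj2 => hmin j (by omega) hj2)

-- core divisibility fact behind the closed form
theorem nat_dvd_mul_iff (N S m : Nat) (hN : N ≠ 0) :
    N ∣ S * m ↔ N / Nat.gcd N S ∣ m := by
  set g := Nat.gcd N S with hg
  have hgpos : 0 < g := Nat.gcd_pos_of_pos_left S (Nat.pos_of_ne_zero hN)
  have hgN : g ∣ N := Nat.gcd_dvd_left N S
  have hgS : g ∣ S := Nat.gcd_dvd_right N S
  obtain ⟨N', hN'⟩ := hgN
  obtain ⟨S', hS'⟩ := hgS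
  have hNg : N / g = N' := by rw [hN', Nat.mul_div_cancel_left _ hgpos]
  have hcop : Nat.Coprime N' S' := by
    have := Nat.coprime_div_gcd_div_gcd (m := N) (n := S) hgpos
    rwa [← hg, hNg, hS', Nat.mul_div_cancel_left _ hgpos] at this
  rw [hNg]
  constructor
  · intro h
    rw [hN', hS', mul_assoc] at h
    have h3 : N' ∣ S' * m := (Nat.mul_dvd_mul_iff_left hgpos).mp h
    exact hcop.dvd_of_dvd_mul_left h3
  · intro h
    obtain ⟨k, hk⟩ := h
    exact ⟨S' * k, by rw [hN', hS', hk]; ring⟩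

-- the Int version used in the main proof
theorem int_dvd_mul_iff (n s j : Int) (hn : n ≠ 0) :
    n ∣ s * j ↔ ((n.natAbs / Int.gcd n s : Nat) : Int) ∣ j := by
  have hN : n.natAbs ≠ 0 := by simpa using hn
  rw [Int.natCast_dvd, ← Int.natAbs_dvd_natAbs, Int.natAbs_mul]
  exact nat_dvd_mul_iff _ _ _ hN

-- ===== VERDICT (by name: the statement is the Claim_ definition above) =====
theorem iterations_spec : Claim_equal_iterations := by
  intro n s _ hpre
  obtain ⟨hn, hcase⟩ := hpre
  unfold Spec_iterations iterations iterations_alt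
  rw [euclid_eq_gcd]
  set g : Nat := Nat.gcd n.natAbs s.natAbs with hg
  set i0 : Int := ((n.natAbs / g : Nat) : Int) with hi0
  have hnabs : 0 < n.natAbs := Int.natAbs_pos.mpr hn
  have hgpos : 0 < g := Nat.gcd_pos_of_pos_left _ hnabs
  have hgdvd : g ∣ n.natAbs := Nat.gcd_dvd_left _ _
  have h1le : (1 : Int) ≤ i0 := by
    rw [hi0]
    exact_mod_cast (Nat.one_le_div_iff hgpos).mpr (Nat.le_of_dvd hnabs hgdvd)
  have hub : i0 ≤ (n.natAbs : Int) := by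
    rw [hi0]; exact_mod_cast Nat.div_le_self n.natAbs g
  have hdvd : ∀ j : Int, n ∣ s * j ↔ i0 ∣ j := fun j => int_dvd_mul_iff n s j hn
  have hPi0 : PySem.Int.mod (s * i0) n = 0 ∧ s * i0 ≥ n := by
    have hd : n ∣ s * i0 := (hdvd i0).mpr dvd_rfl
    refine ⟨(PySem.Int.mod_eq_zero_iff_dvd _ _).mpr hd, ?_⟩
    rcases hcase with hs | ⟨hnneg, hs0⟩ | ⟨hnneg, hsneg, hsd⟩
    · -- s > 0 : s*i0 is a positive multiple of n when n > 0; trivial when n < 0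
      rcases lt_or_gt_of_ne hn with hnneg | hnpos
      · have : 0 < s * i0 := mul_pos hs (by omega)
        omega
      · exact Int.le_of_dvd (mul_pos hs (by omega)) hd
    · -- n < 0, s = 0
      subst hs0; simp; omega
    · -- n < 0, s < 0, s ∣ n : here s*i0 = n exactly
      have hSd : s.natAbs ∣ n.natAbs := Int.natAbs_dvd_natAbs.mpr hsd
      have hsg : g = s.natAbs :=
        Nat.dvd_antisymm (Nat.gcd_dvd_right _ _) (Nat.dvd_gcd hSd dvd_rfl)
      have hmul : s.natAbs * (n.natAbs / s.natAbs) = n.natAbs := Nat.mul_div_cancel' hSd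
      have hmulZ : ((s.natAbs : Int)) * ((n.natAbs / s.natAbs : Nat) : Int) = (n.natAbs : Int) := by
        exact_mod_cast hmul
      have hs2 : s = -(s.natAbs : Int) := by omega
      have hn2 : n = -(n.natAbs : Int) := by omega
      have heq : s * i0 = n := by
        rw [hi0, hsg]
        linear_combination ((n.natAbs / s.natAbs : Nat) : Int) * hs2 - hn2 - hmulZ
      omega
  have hmin : ∀ j : Int, 1 ≤ j → j < i0 →
      ¬(PySem.Int.mod (s * j) n = 0 ∧ s * j ≥ n) := by
    rintro j h1 h2 ⟨hm, -⟩
    have hd : n ∣ s * j := (PySem.Int.mod_eq_zero_iff_dvd _ _).mp hm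
    have hij : i0 ∣ j := (hdvd j).mp hd
    have := Int.le_of_dvd (by omega) hij
    omega
  exact iterLoopA_reach n s (n.natAbs + 1) 1 i0 h1le (by omega) hPi0
    (fun j hj1 hj2 => hmin j hj1 hj2)
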